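-- pv_equiv track=rewrite | github.com/Fardan-Ali/Water-Sort-Solver | WaterSortSolver.py | valid_moves_function
-- ===== SOURCE A (Python) =====
-- def valid_moves_function(current_state):
--
--     valid_move_list = []
--     source_tube_id = -1 # tracks the index of the source tube
--
--     for source_tube in current_state:
--         source_tube_id += 1
--         target_tube_id = -1 # tracks the index of the target tube
--         for target_tube in current_state:
--             target_tube_id += 1
--             # check if the tubes are different and source is not empty
--             if source_tube and source_tube_id!=target_tube_id:
--                 # if the target is empty, ensure the source is not a single colour (redundant move)
--                 # if the target is not empty, ensure it is not full and the top fluid is the same colour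
--                 if (not target_tube and source_tube[-1][1] != sum(v for _, v in source_tube)) or (target_tube and source_tube[-1][0]==target_tube[-1][0] and sum(v for _, v in target_tube) <= 3):
--                         # add a tuple with the source and target to the valid moves list
--                         valid_move_list.append((source_tube_id, target_tube_id))
--     return valid_move_list
-- ===== SOURCE B (Python) =====
-- def valid_moves_function(current_state):
--     # Index-first strategy: one pass builds the empty-tube id list and a
--     # top-color -> ids map of pourable (non-empty, sum <= 3) tubes; a second
--     # pass per source merges and sorts its candidate target ids.
--     empties = []
--     color_map = {}
--     for i, tube in enumerate(current_state):
--         if not tube: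
--             empties.append(i)
--         elif sum(v for _, v in tube) <= 3:
--             color_map.setdefault(tube[-1][0], []).append(i)
--     moves = []
--     for i, tube in enumerate(current_state):
--         if not tube:
--             continue
--         targets = []
--         if tube[-1][1] != sum(v for _, v in tube):
--             targets.extend(empties)
--         targets.extend(j for j in color_map.get(tube[-1][0], []) if j != i)
--         targets.sort()
--         moves.extend((i, j) for j in targets)
--     return moves
-- ===== Notes on version B (the rewrite author's own statement) =====
-- stated objective: faster
-- what changed: Replaces the nested all-pairs scan (re-summing each target tube per pair) with a single indexing pass that builds the empty-tube id list and a top-color -> pourable-tube-ids map, then one pass per source merging and sorting its candidate target ids.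
import Mathlib
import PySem

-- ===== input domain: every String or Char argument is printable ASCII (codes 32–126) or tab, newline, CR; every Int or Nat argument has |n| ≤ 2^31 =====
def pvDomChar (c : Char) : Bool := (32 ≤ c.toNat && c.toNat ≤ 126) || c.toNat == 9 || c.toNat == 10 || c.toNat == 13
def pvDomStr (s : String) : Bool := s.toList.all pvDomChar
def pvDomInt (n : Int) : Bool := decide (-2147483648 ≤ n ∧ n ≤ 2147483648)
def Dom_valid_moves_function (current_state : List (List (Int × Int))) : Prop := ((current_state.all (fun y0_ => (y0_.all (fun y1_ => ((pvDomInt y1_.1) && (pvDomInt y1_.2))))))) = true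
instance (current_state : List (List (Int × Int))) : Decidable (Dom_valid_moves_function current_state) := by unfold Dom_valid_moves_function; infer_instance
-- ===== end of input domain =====

-- B replaces A's nested all-pairs scan by one indexing pass (empty-tube ids + top-color -> pourable-tube ids)
-- followed by a sorted merge of candidate target ids per source tube; same return value.

-- ===== PORT A =====
def valid_moves_function (current_state : List (List (Int × Int))) : List (Int × Int) :=
  (current_state.foldl (fun (st : List (Int × Int) × Int) source_tube =>
    let source_tube_id := st.2 + 1
    let inner := current_state.foldl (fun (ist : List (Int × Int) × Int) target_tube =>
      let target_tube_id := ist.2 + 1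
      if source_tube ≠ [] ∧ source_tube_id ≠ target_tube_id then
        if (target_tube = [] ∧ (PySem.List.pyGetD source_tube (-1) (0, 0)).2 ≠ (source_tube.map (·.2)).sum)
           ∨ (target_tube ≠ [] ∧ (PySem.List.pyGetD source_tube (-1) (0, 0)).1 = (PySem.List.pyGetD target_tube (-1) (0, 0)).1
              ∧ (target_tube.map (·.2)).sum ≤ 3) then
          (ist.1 ++ [(source_tube_id, target_tube_id)], target_tube_id)
        else (ist.1, target_tube_id)
      else (ist.1, target_tube_id)) (st.1, -1)
    (inner.1, source_tube_id)) ([], -1)).1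

-- ===== PORT B =====
def valid_moves_function_alt (current_state : List (List (Int × Int))) : List (Int × Int) :=
  let build := (PySem.List.enumerate current_state 0).foldl
    (fun (st : List Int × PySem.Dict Int (List Int)) p =>
      if p.2 = [] then (st.1 ++ [p.1], st.2)
      else if (p.2.map (·.2)).sum ≤ 3 then
        (st.1, st.2.modify (PySem.List.pyGetD p.2 (-1) ((0:Int), (0:Int))).1 [] (· ++ [p.1]))
      else st) ([], PySem.Dict.empty)
  (PySem.List.enumerate current_state 0).foldl
    (fun (moves : List (Int × Int)) p =>
      if p.2 = [] then moves
      else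
        let targets :=
          (if (PySem.List.pyGetD p.2 (-1) ((0:Int), (0:Int))).2 ≠ (p.2.map (·.2)).sum then build.1 else []) ++
          (build.2.getD (PySem.List.pyGetD p.2 (-1) ((0:Int), (0:Int))).1 []).filter (fun j => j ≠ p.1)
        moves ++ (PySem.List.sorted targets (fun x => x)).map (fun j => (p.1, j))) []

-- ===== PRECONDITION & SPEC =====
def Spec_valid_moves_function (current_state : List (List (Int × Int))) (out : List (Int × Int)) : Prop := out = valid_moves_function_alt current_state
instance (current_state : List (List (Int × Int))) (out : List (Int × Int)) : Decidable (Spec_valid_moves_function current_state out) := by unfold Spec_valid_moves_function; infer_instance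

-- ===== CLAIM (what is proved, stated in full; the proofs are below) =====
def Claim_equal_valid_moves_function : Prop := ∀ (current_state : List (List (Int × Int))), Dom_valid_moves_function current_state → Spec_valid_moves_function current_state (valid_moves_function current_state)

-- ===== LEMMAS AND PROOFS =====

-- A's pair test as one boolean predicate on (source tube, source id, target tube, target id)
def moveOK (s : List (Int × Int)) (i : Int) (t : List (Int × Int)) (j : Int) : Bool :=
  decide (s ≠ [] ∧ i ≠ j ∧
    ((t = [] ∧ (PySem.List.pyGetD s (-1) ((0:Int), (0:Int))).2 ≠ (s.map (·.2)).sum)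
     ∨ (t ≠ [] ∧ (PySem.List.pyGetD s (-1) ((0:Int), (0:Int))).1 = (PySem.List.pyGetD t (-1) ((0:Int), (0:Int))).1
        ∧ (t.map (·.2)).sum ≤ 3)))

-- canonical result: all (source,target) pairs in index order passing moveOK
def canon (cs : List (List (Int × Int))) : List (Int × Int) :=
  (PySem.List.enumerate cs 0).flatMap (fun p =>
    ((PySem.List.enumerate cs 0).filter (fun q => moveOK p.2 p.1 q.2 q.1)).map (fun q => (p.1, q.1)))

lemma A_inner (s : List (Int × Int)) (i : Int) :
    ∀ (l : List (List (Int × Int))) (k : Int) (acc : List (Int × Int)),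
    (l.foldl (fun (ist : List (Int × Int) × Int) target_tube =>
      let target_tube_id := ist.2 + 1
      if s ≠ [] ∧ i ≠ target_tube_id then
        if (target_tube = [] ∧ (PySem.List.pyGetD s (-1) (0, 0)).2 ≠ (s.map (·.2)).sum)
           ∨ (target_tube ≠ [] ∧ (PySem.List.pyGetD s (-1) (0, 0)).1 = (PySem.List.pyGetD target_tube (-1) (0, 0)).1
              ∧ (target_tube.map (·.2)).sum ≤ 3) then
          (ist.1 ++ [(i, target_tube_id)], target_tube_id)
        else (ist.1, target_tube_id)
      else (ist.1, target_tube_id)) (acc, k))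
    = (acc ++ ((PySem.List.enumerate l (k + 1)).filter (fun q => moveOK s i q.2 q.1)).map (fun q => (i, q.1)),
       k + l.length) := by
  intro l
  induction l with
  | nil => intro k acc; simp [PySem.List.enumerate]
  | cons t l ih =>
    intro k acc
    rw [List.foldl_cons]
    have hstep : (let target_tube_id := ((acc, k) : List (Int × Int) × Int).2 + 1
      if s ≠ [] ∧ i ≠ target_tube_id then
        if (t = [] ∧ (PySem.List.pyGetD s (-1) (0, 0)).2 ≠ (s.map (·.2)).sum)
           ∨ (t ≠ [] ∧ (PySem.List.pyGetD s (-1) (0, 0)).1 = (PySem.List.pyGetD t (-1) (0, 0)).1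
              ∧ (t.map (·.2)).sum ≤ 3) then
          (((acc, k) : List (Int × Int) × Int).1 ++ [(i, target_tube_id)], target_tube_id)
        else (((acc, k) : List (Int × Int) × Int).1, target_tube_id)
      else (((acc, k) : List (Int × Int) × Int).1, target_tube_id))
      = ((if moveOK s i t (k + 1) then acc ++ [(i, k + 1)] else acc), k + 1) := by
      simp only [moveOK, decide_eq_true_eq]
      split_ifs with h1 h2 h3 h3 <;> simp_all
    rw [hstep, ih (k + 1)]
    rw [PySem.List.enumerate_cons]
    by_cases h : moveOK s i t (k + 1) <;> simp [h] <;> omega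

lemma A_outer (cs : List (List (Int × Int))) :
    ∀ (l : List (List (Int × Int))) (k : Int) (acc : List (Int × Int)),
    (l.foldl (fun (st : List (Int × Int) × Int) source_tube =>
      let source_tube_id := st.2 + 1
      let inner := cs.foldl (fun (ist : List (Int × Int) × Int) target_tube =>
        let target_tube_id := ist.2 + 1
        if source_tube ≠ [] ∧ source_tube_id ≠ target_tube_id then
          if (target_tube = [] ∧ (PySem.List.pyGetD source_tube (-1) (0, 0)).2 ≠ (source_tube.map (·.2)).sum)
             ∨ (target_tube ≠ [] ∧ (PySem.List.pyGetD source_tube (-1) (0, 0)).1 = (PySem.List.pyGetD target_tube (-1) (0, 0)).1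
                ∧ (target_tube.map (·.2)).sum ≤ 3) then
            (ist.1 ++ [(source_tube_id, target_tube_id)], target_tube_id)
          else (ist.1, target_tube_id)
        else (ist.1, target_tube_id)) (st.1, -1)
      (inner.1, source_tube_id)) (acc, k))
    = (acc ++ (PySem.List.enumerate l (k + 1)).flatMap (fun p =>
        ((PySem.List.enumerate cs 0).filter (fun q => moveOK p.2 p.1 q.2 q.1)).map (fun q => (p.1, q.1))),
       k + l.length) := by
  intro l
  induction l with
  | nil => intro k acc; simp [PySem.List.enumerate]
  | cons t l ih =>
    intro k acc
    rw [List.foldl_cons]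
    have hstep : (let source_tube_id := ((acc, k) : List (Int × Int) × Int).2 + 1
      let inner := cs.foldl (fun (ist : List (Int × Int) × Int) target_tube =>
        let target_tube_id := ist.2 + 1
        if t ≠ [] ∧ source_tube_id ≠ target_tube_id then
          if (target_tube = [] ∧ (PySem.List.pyGetD t (-1) (0, 0)).2 ≠ (t.map (·.2)).sum)
             ∨ (target_tube ≠ [] ∧ (PySem.List.pyGetD t (-1) (0, 0)).1 = (PySem.List.pyGetD target_tube (-1) (0, 0)).1
                ∧ (target_tube.map (·.2)).sum ≤ 3) then
            (ist.1 ++ [(source_tube_id, target_tube_id)], target_tube_id)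
          else (ist.1, target_tube_id)
        else (ist.1, target_tube_id)) (((acc, k) : List (Int × Int) × Int).1, -1)
      ((inner.1, source_tube_id) : List (Int × Int) × Int))
      = (acc ++ ((PySem.List.enumerate cs 0).filter (fun q => moveOK t (k + 1) q.2 q.1)).map (fun q => ((k + 1), q.1)), k + 1) := by
      show ((cs.foldl _ (acc, -1)).1, k + 1) = _
      rw [show ((acc, (-1 : Int))) = ((acc, (-1 : Int) + 0)) by norm_num]
      rw [A_inner t (k + 1) cs (-1 + 0) acc]
      norm_num
    rw [hstep, ih (k + 1)]
    rw [PySem.List.enumerate_cons]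
    simp
    omega

lemma A_eq_canon (cs : List (List (Int × Int))) : valid_moves_function cs = canon cs := by
  unfold valid_moves_function canon
  rw [show (([], (-1 : Int)) : List (Int × Int) × Int) = (([], (-1 : Int) + 0) : List (Int × Int) × Int) by norm_num]
  rw [A_outer cs cs (-1 + 0) []]
  norm_num

-- characterization of B's first pass
lemma B_build (l : List (Int × List (Int × Int))) :
    ∀ (e : List Int) (d : PySem.Dict Int (List Int)),
    (l.foldl (fun (st : List Int × PySem.Dict Int (List Int)) p =>
      if p.2 = [] then (st.1 ++ [p.1], st.2)
      else if (p.2.map (·.2)).sum ≤ 3 then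
        (st.1, st.2.modify (PySem.List.pyGetD p.2 (-1) ((0:Int), (0:Int))).1 [] (· ++ [p.1]))
      else st) (e, d)).1
      = e ++ (l.filter (fun p => decide (p.2 = []))).map (·.1)
    ∧ ∀ c, ((l.foldl (fun (st : List Int × PySem.Dict Int (List Int)) p =>
      if p.2 = [] then (st.1 ++ [p.1], st.2)
      else if (p.2.map (·.2)).sum ≤ 3 then
        (st.1, st.2.modify (PySem.List.pyGetD p.2 (-1) ((0:Int), (0:Int))).1 [] (· ++ [p.1]))
      else st) (e, d)).2).getD c []
      = d.getD c [] ++ (l.filter (fun p =>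
          decide (p.2 ≠ []) && decide ((p.2.map (·.2)).sum ≤ 3)
          && decide ((PySem.List.pyGetD p.2 (-1) ((0:Int), (0:Int))).1 = c))).map (·.1) := by
  induction l with
  | nil => intro e d; simp
  | cons p l ih =>
    intro e d
    rw [List.foldl_cons]
    by_cases h1 : p.2 = []
    · have hstep : (if p.2 = [] then (((e, d) : List Int × PySem.Dict Int (List Int)).1 ++ [p.1], ((e, d) : List Int × PySem.Dict Int (List Int)).2)
        else if (p.2.map (·.2)).sum ≤ 3 then
          (((e, d) : List Int × PySem.Dict Int (List Int)).1, ((e, d) : List Int × PySem.Dict Int (List Int)).2.modify (PySem.List.pyGetD p.2 (-1) ((0:Int), (0:Int))).1 [] (· ++ [p.1]))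
        else ((e, d) : List Int × PySem.Dict Int (List Int))) = (e ++ [p.1], d) := by simp [h1]
      rw [hstep]
      rcases ih (e ++ [p.1]) d with ⟨ha, hb⟩
      refine ⟨?_, ?_⟩
      · rw [ha]; simp [h1]
      · intro c; rw [hb c]; simp [h1]
    · by_cases h2 : (p.2.map (·.2)).sum ≤ 3
      · have hstep : (if p.2 = [] then (((e, d) : List Int × PySem.Dict Int (List Int)).1 ++ [p.1], ((e, d) : List Int × PySem.Dict Int (List Int)).2)
          else if (p.2.map (·.2)).sum ≤ 3 then
            (((e, d) : List Int × PySem.Dict Int (List Int)).1, ((e, d) : List Int × PySem.Dict Int (List Int)).2.modify (PySem.List.pyGetD p.2 (-1) ((0:Int), (0:Int))).1 [] (· ++ [p.1]))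
          else ((e, d) : List Int × PySem.Dict Int (List Int))) = (e, d.modify (PySem.List.pyGetD p.2 (-1) ((0:Int), (0:Int))).1 [] (· ++ [p.1])) := by simp [h1, h2]
        rw [hstep]
        rcases ih e (d.modify (PySem.List.pyGetD p.2 (-1) ((0:Int), (0:Int))).1 [] (· ++ [p.1])) with ⟨ha, hb⟩
        refine ⟨?_, ?_⟩
        · rw [ha]; simp [h1]
        · intro c
          rw [hb c]
          by_cases hc : (PySem.List.pyGetD p.2 (-1) ((0:Int), (0:Int))).1 = c
          · subst hc
            rw [PySem.Dict.getD_modify_self]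
            simp [h1, h2]
          · rw [PySem.Dict.getD_modify_of_ne d [] _ (Ne.symm hc)]
            simp [h1, h2, hc]
      · have hstep : (if p.2 = [] then (((e, d) : List Int × PySem.Dict Int (List Int)).1 ++ [p.1], ((e, d) : List Int × PySem.Dict Int (List Int)).2)
          else if (p.2.map (·.2)).sum ≤ 3 then
            (((e, d) : List Int × PySem.Dict Int (List Int)).1, ((e, d) : List Int × PySem.Dict Int (List Int)).2.modify (PySem.List.pyGetD p.2 (-1) ((0:Int), (0:Int))).1 [] (· ++ [p.1]))
          else ((e, d) : List Int × PySem.Dict Int (List Int))) = (e, d) := by simp [h1, h2]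
        rw [hstep]
        rcases ih e d with ⟨ha, hb⟩
        refine ⟨?_, ?_⟩
        · rw [ha]; simp [h1]
        · intro c; rw [hb c]; simp [h1, h2]

lemma filter_or_perm {α : Type} (p q : α → Bool) (h : ∀ x, ¬(p x = true ∧ q x = true)) :
    ∀ l : List α, (l.filter (fun x => p x || q x)).Perm (l.filter p ++ l.filter q) := by
  intro l
  induction l with
  | nil => simp
  | cons a l ih =>
    by_cases hp : p a = true
    · have hq : q a = false := by
        rcases Bool.eq_false_or_eq_true (q a) with h' | h'
        · exact absurd ⟨hp, h'⟩ (h a)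
        · exact h'
      simp only [List.filter_cons, hp, hq, Bool.true_or, if_true]
      simpa using ih.cons a
    · have hp' : p a = false := by simpa using hp
      by_cases hq : q a = true
      · simp only [List.filter_cons, hp', hq, Bool.false_or, if_true]
        simp only [Bool.false_eq_true, if_false]
        exact (ih.cons a).trans List.perm_middle.symm
      · have hq' : q a = false := by simpa using hq
        simp only [List.filter_cons, hp', hq', Bool.false_or]
        simpa using ih

lemma enum_fst_inj {α : Type} (l : List α) (s : Int) (p q : Int × α)
    (hp : p ∈ PySem.List.enumerate l s) (hq : q ∈ PySem.List.enumerate l s) (h : p.1 = q.1) : p = q := by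
  rw [PySem.List.mem_enumerate_iff] at hp hq
  obtain ⟨k, hk, rfl⟩ := hp
  obtain ⟨k', hk', rfl⟩ := hq
  simp only at h
  have : k = k' := by omega
  subst this; rfl

def emptyIds (cs : List (List (Int × Int))) : List Int :=
  ((PySem.List.enumerate cs 0).filter (fun q => decide (q.2 = []))).map (·.1)

def colorIds (cs : List (List (Int × Int))) (c : Int) : List Int :=
  ((PySem.List.enumerate cs 0).filter (fun q =>
    decide (q.2 ≠ []) && decide ((q.2.map (·.2)).sum ≤ 3)
    && decide ((PySem.List.pyGetD q.2 (-1) ((0:Int), (0:Int))).1 = c))).map (·.1)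

lemma per_source (cs : List (List (Int × Int))) (p : Int × List (Int × Int))
    (hp : p ∈ PySem.List.enumerate cs 0) (hne : p.2 ≠ []) :
    PySem.List.sorted
      ((if (PySem.List.pyGetD p.2 (-1) ((0:Int), (0:Int))).2 ≠ (p.2.map (·.2)).sum then emptyIds cs else []) ++
       (colorIds cs (PySem.List.pyGetD p.2 (-1) ((0:Int), (0:Int))).1).filter (fun j => j ≠ p.1))
      (fun x => x)
    = ((PySem.List.enumerate cs 0).filter (fun q => moveOK p.2 p.1 q.2 q.1)).map (·.1) := by
  set c := (PySem.List.pyGetD p.2 (-1) ((0:Int), (0:Int))).1 with hc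
  set G := (PySem.List.pyGetD p.2 (-1) ((0:Int), (0:Int))).2 ≠ (p.2.map (·.2)).sum with hG
  set P1 : Int × List (Int × Int) → Bool := fun q => decide (q.2 = []) && decide G with hP1
  set P2 : Int × List (Int × Int) → Bool := fun q =>
    (decide (q.2 ≠ []) && decide ((q.2.map (·.2)).sum ≤ 3)
      && decide ((PySem.List.pyGetD q.2 (-1) ((0:Int), (0:Int))).1 = c)) && decide (q.1 ≠ p.1) with hP2
  have h1 : (if G then emptyIds cs else []) = ((PySem.List.enumerate cs 0).filter P1).map (·.1) := by
    by_cases hg : G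
    · simp only [if_pos hg, emptyIds, hP1]
      congr 1
      apply List.filter_congr
      intro x _
      simp [hg]
    · simp only [if_neg hg, hP1]
      have : ∀ x ∈ PySem.List.enumerate cs 0, (decide (x.2 = []) && decide G) = false := by
        intro x _; simp [hg]
      rw [List.filter_congr this]
      simp
  have h2 : (colorIds cs c).filter (fun j => j ≠ p.1) = ((PySem.List.enumerate cs 0).filter P2).map (·.1) := by
    simp only [colorIds, hP2]
    rw [List.filter_map, List.filter_filter]
    congr 1
    apply List.filter_congr
    intro x _
    simp only [Function.comp]
    rw [Bool.and_comm]
  rw [h1, h2, ← List.map_append]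
  have hdisj : ∀ q, ¬(P1 q = true ∧ P2 q = true) := by
    intro q ⟨ha, hb⟩
    simp only [hP1, hP2, Bool.and_eq_true, decide_eq_true_eq] at ha hb
    exact hb.1.1.1 ha.1
  have hcongr : ∀ q ∈ PySem.List.enumerate cs 0, moveOK p.2 p.1 q.2 q.1 = (P1 q || P2 q) := by
    intro q hq
    by_cases hq2 : q.2 = []
    · have hij : p.1 ≠ q.1 := by
        intro h
        exact hne (by rw [enum_fst_inj cs 0 p q hp hq h]; exact hq2)
      simp [moveOK, hP1, hP2, hq2, hne, hij, hG]
    · by_cases heq : (PySem.List.pyGetD p.2 (-1) ((0:Int), (0:Int))).1 = (PySem.List.pyGetD q.2 (-1) ((0:Int), (0:Int))).1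
      <;> by_cases hle : (q.2.map (·.2)).sum ≤ 3
      <;> by_cases hij : q.1 = p.1
      <;> simp [moveOK, hP1, hP2, hq2, hne, hij, heq, hle, hc, eq_comm]
  have hperm : (((PySem.List.enumerate cs 0).filter (fun q => moveOK p.2 p.1 q.2 q.1)).map (·.1)).Perm
      ((((PySem.List.enumerate cs 0).filter P1) ++ ((PySem.List.enumerate cs 0).filter P2)).map (·.1)) := by
    apply List.Perm.map
    rw [List.filter_congr hcongr]
    exact filter_or_perm P1 P2 hdisj _
  have hpw : (((PySem.List.enumerate cs 0).filter (fun q => moveOK p.2 p.1 q.2 q.1)).map (·.1)).Pairwise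
      (fun a b => (fun (x : Int) => x) a < (fun (x : Int) => x) b) := by
    apply List.pairwise_map.mpr
    exact (PySem.List.pairwise_lt_enumerate cs 0).filter _
  exact PySem.List.sorted_eq_of_perm_of_pairwise_lt _ _ _ hperm hpw

lemma B_second (bd : List Int × PySem.Dict Int (List Int)) :
    ∀ (l : List (Int × List (Int × Int))) (acc : List (Int × Int)),
    (l.foldl (fun (moves : List (Int × Int)) p =>
      if p.2 = [] then moves
      else
        let targets :=
          (if (PySem.List.pyGetD p.2 (-1) ((0:Int), (0:Int))).2 ≠ (p.2.map (·.2)).sum then bd.1 else []) ++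
          (bd.2.getD (PySem.List.pyGetD p.2 (-1) ((0:Int), (0:Int))).1 []).filter (fun j => j ≠ p.1)
        moves ++ (PySem.List.sorted targets (fun x => x)).map (fun j => (p.1, j))) acc)
    = acc ++ l.flatMap (fun p =>
        if p.2 = [] then [] else
        (PySem.List.sorted
          ((if (PySem.List.pyGetD p.2 (-1) ((0:Int), (0:Int))).2 ≠ (p.2.map (·.2)).sum then bd.1 else []) ++
           (bd.2.getD (PySem.List.pyGetD p.2 (-1) ((0:Int), (0:Int))).1 []).filter (fun j => j ≠ p.1))
          (fun x => x)).map (fun j => (p.1, j))) := by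
  intro l
  induction l with
  | nil => intro acc; simp
  | cons p l ih =>
    intro acc
    rw [List.foldl_cons, List.flatMap_cons]
    by_cases h : p.2 = []
    · simp only [h, if_true]
      rw [ih acc]
      simp
    · simp only [if_neg h]
      rw [ih]
      simp [List.append_assoc]

lemma B_eq_canon (cs : List (List (Int × Int))) : valid_moves_function_alt cs = canon cs := by
  simp only [valid_moves_function_alt]
  rw [B_second]
  rcases B_build (PySem.List.enumerate cs 0) [] PySem.Dict.empty with ⟨hE, hCM⟩
  rw [List.nil_append]
  unfold canon
  apply List.flatMap_congr
  intro p hp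
  by_cases h : p.2 = []
  · simp only [h, if_true]
    have : ∀ q ∈ PySem.List.enumerate cs 0, (moveOK [] p.1 q.2 q.1) = false := by
      intro q _; simp [moveOK]
    rw [List.filter_congr this]
    simp
  · simp only [if_neg h]
    rw [hE, hCM]
    have hE' : ([] : List Int) ++ ((PySem.List.enumerate cs 0).filter (fun q => decide (q.2 = []))).map (·.1) = emptyIds cs := by
      simp [emptyIds]
    have hCM' : (PySem.Dict.empty : PySem.Dict Int (List Int)).getD (PySem.List.pyGetD p.2 (-1) ((0:Int), (0:Int))).1 [] ++
        ((PySem.List.enumerate cs 0).filter (fun q =>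
          decide (q.2 ≠ []) && decide ((q.2.map (·.2)).sum ≤ 3)
          && decide ((PySem.List.pyGetD q.2 (-1) ((0:Int), (0:Int))).1 = (PySem.List.pyGetD p.2 (-1) ((0:Int), (0:Int))).1))).map (·.1)
        = colorIds cs (PySem.List.pyGetD p.2 (-1) ((0:Int), (0:Int))).1 := by
      simp [colorIds]
    rw [hE', hCM', per_source cs p hp h]
    rw [List.map_map]
    rfl

-- ===== VERDICT (by name: the statement is the Claim_ definition above) =====
theorem valid_moves_function_spec : Claim_equal_valid_moves_function := by
  intro cs _
  unfold Spec_valid_moves_function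
  rw [A_eq_canon, B_eq_canon]
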